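-- pv_equiv track=rewrite | github.com/danielholmes839/adventofcode2025 | src/day6.py | part1
-- ===== SOURCE A (Python) =====
-- def part1(data: str) -> int:
--     lines = data.splitlines()
--     ops = list(filter(lambda op: op != '', lines[-1].split(" ")))
--
--     values = []
--     for op in ops:
--         if op == '*':
--             values.append(1)
--         else:
--             values.append(0)
--
--     for line in lines[:-1]:
--         nums = [int(num) for num in line.split(" ") if num.isdecimal()]
--         for i, num, op in zip(range(len(ops)), nums, ops):
--             if op == '*':
--                 values[i] *= num
--             else:
--                 values[i] += num
--
--     return sum(values)
-- ===== SOURCE B (Python) =====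
-- def part1(data: str) -> int:
--     lines = data.splitlines()
--     ops = [op for op in lines[-1].split(" ") if op != '']
--     cols = [[] for _ in ops]
--     for line in lines[:-1]:
--         nums = [int(num) for num in line.split(" ") if num.isdecimal()]
--         for j in range(min(len(nums), len(ops))):
--             cols[j].append(nums[j])
--     total = 0
--     for col, op in zip(cols, ops):
--         if op == '*':
--             r = 1
--             for x in col:
--                 r *= x
--         else:
--             r = 0
--             for x in col:
--                 r += x
--         total += r
--     return total
-- ===== Notes on version B (the rewrite author's own statement) =====
-- stated objective: alternative
-- what changed: Replaces A's row-by-row in-place accumulation into a shared values list by collecting each column's numbers into per-column lists and reducing each column once (product or sum) at the end.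
-- outside the precondition, e.g. on part1(''): A raises IndexError, B raises IndexError
import Mathlib
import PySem

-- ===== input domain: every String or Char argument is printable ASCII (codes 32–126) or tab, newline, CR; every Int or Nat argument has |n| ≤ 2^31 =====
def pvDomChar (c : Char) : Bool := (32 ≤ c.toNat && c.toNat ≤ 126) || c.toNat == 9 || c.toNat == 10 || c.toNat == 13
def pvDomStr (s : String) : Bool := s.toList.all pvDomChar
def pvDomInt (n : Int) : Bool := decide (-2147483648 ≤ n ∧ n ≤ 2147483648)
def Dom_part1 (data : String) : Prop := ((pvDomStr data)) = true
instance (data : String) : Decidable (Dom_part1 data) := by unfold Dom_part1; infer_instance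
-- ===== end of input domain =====

-- B collects each column's numbers into per-column lists and reduces each column once at the end,
-- instead of A's row-by-row in-place accumulation; same cost, different decomposition.

-- ===== PORT A =====
-- shared parsing (identical in both Pythons): the numbers of one line. split? with sep " " is never none.
-- num.isdecimal() is PySem.Str.strIsdigit (exact on the ASCII domain); int(num) always
-- succeeds on such strings, so the .getD 0 default is never taken.
def pvNums (line : String) : List Int :=
  (((PySem.Str.split? line " ").getD []).filter PySem.Str.strIsdigit).map
    (fun s => (PySem.Int.ofStr? s).getD 0)

-- shared parsing: the ops of the last line; lines[-1] is none only for data = "" (IndexError, outside Pre_)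
def pvOps (lines : List String) : List String :=
  ((PySem.Str.split? ((PySem.List.pyGet? lines (-1)).getD "") " ").getD []).filter (fun op => op != "")

-- the inner zip loop of A over one line
def pvStepA (ops : List String) (values : List Int) (line : String) : List Int :=
  (((List.range ops.length).zip (pvNums line)).zip ops).foldl
    (fun vals p =>
      if p.2 == "*" then vals.set p.1.1 (vals.getD p.1.1 0 * p.1.2)
      else vals.set p.1.1 (vals.getD p.1.1 0 + p.1.2))
    values

def part1 (data : String) : Int :=
  let lines := PySem.Str.splitlines data
  let ops := pvOps lines
  let values := ops.foldl (fun vs op => vs ++ [if op == "*" then (1 : Int) else 0]) []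
  let values := (PySem.List.slice lines none (some (-1))).foldl (pvStepA ops) values
  values.sum

-- ===== PORT B =====
-- the inner column-append loop of B over one line
def pvStepB (n : Nat) (cols : List (List Int)) (line : String) : List (List Int) :=
  (List.range (min (pvNums line).length n)).foldl
    (fun cs j => cs.set j (cs.getD j [] ++ [(pvNums line).getD j 0])) cols

def part1_alt (data : String) : Int :=
  let lines := PySem.Str.splitlines data
  let ops := pvOps lines
  let cols := ops.map (fun _ => ([] : List Int))
  let cols := (PySem.List.slice lines none (some (-1))).foldl (pvStepB ops.length) cols
  (cols.zip ops).foldl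
    (fun t p =>
      t + (if p.2 == "*" then p.1.foldl (· * ·) 1 else p.1.foldl (· + ·) 0)) 0

-- ===== PRECONDITION & SPEC =====
-- Pre_ excludes only data = "", on which both Pythons raise IndexError at lines[-1].
def Pre_part1 (data : String) : Prop := data ≠ ""
instance (data : String) : Decidable (Pre_part1 data) := by unfold Pre_part1; infer_instance
def pvWitness_part1 : String := "1 2\n3 4\n* +"

def Spec_part1 (data : String) (out : Int) : Prop := out = part1_alt data
instance (data : String) (out : Int) : Decidable (Spec_part1 data out) := by unfold Spec_part1; infer_instance

-- ===== CLAIM (what is proved, stated in full; the proofs are below) =====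
def Claim_equal_part1 : Prop := ∀ (data : String), Dom_part1 data → Pre_part1 data → Spec_part1 data (part1 data)

-- ===== LEMMAS AND PROOFS =====

-- the value of one finished column: A's running accumulator equals this reduction
def pvRed (p : List Int × String) : Int :=
  p.1.foldl (fun a x => if p.2 == "*" then a * x else a + x)
    (if p.2 == "*" then (1 : Int) else 0)

theorem pv_red_eq (p : List Int × String) :
    pvRed p = if p.2 == "*" then p.1.foldl (· * ·) 1 else p.1.foldl (· + ·) 0 := by
  cases h : p.2 == "*" <;> simp [pvRed, h]

theorem pv_foldl_append {α β : Type} (f : α → β) :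
    ∀ (l : List α) (acc : List β),
      l.foldl (fun vs op => vs ++ [f op]) acc = acc ++ l.map f := by
  intro l
  induction l with
  | nil => simp
  | cons a t ih => intro acc; simp [ih]

theorem pv_set_foldl_length {α : Type} (f : Nat → α → α) (d : α) :
    ∀ (l : List Nat) (xs : List α),
      (l.foldl (fun ys i => ys.set i (f i (ys.getD i d))) xs).length = xs.length := by
  intro l
  induction l with
  | nil => intro xs; rfl
  | cons a t ih => intro xs; rw [List.foldl_cons, ih, List.length_set]

theorem pv_set_foldl_get? {α : Type} (f : Nat → α → α) (d : α) :
    ∀ (m : Nat) (xs : List α), m ≤ xs.length → ∀ (k : Nat),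
      ((List.range m).foldl (fun ys i => ys.set i (f i (ys.getD i d))) xs)[k]? =
        if k < m then some (f k (xs.getD k d)) else xs[k]? := by
  intro m
  induction m with
  | zero => simp
  | succ m ih =>
    intro xs hm k
    rw [List.range_succ, List.foldl_append, List.foldl_cons, List.foldl_nil]
    have hlen := pv_set_foldl_length f d (List.range m) xs
    have hP := ih xs (by omega)
    have hPm : ((List.range m).foldl (fun ys i => ys.set i (f i (ys.getD i d))) xs).getD m d
        = xs.getD m d := by
      rw [List.getD_eq_getElem?_getD, hP m, if_neg (by omega), ← List.getD_eq_getElem?_getD]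
    rw [List.getElem?_set, hPm, hlen, hP k]
    split_ifs <;> first | rfl | omega |
      (subst_vars; rw [List.getD_eq_getElem?_getD, List.getElem?_eq_getElem (by omega),
        Option.getD_some])
  
theorem pv_zipzip (n : Nat) (nums : List Int) (ops : List String) (hn : ops.length = n) :
    ((List.range n).zip nums).zip ops
      = (List.range (min nums.length n)).map
          (fun i => ((i, nums.getD i 0), ops.getD i "")) := by
  apply List.ext_getElem
  · simp [hn, Nat.min_comm]
  · intro i h1 h2
    simp only [List.getElem_zip, List.getElem_range, List.getElem_map]
    simp only [List.length_zip, List.length_range, hn] at h1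
    rw [List.getD_eq_getElem (hn := by omega), List.getD_eq_getElem (hn := by omega)]

def pvF (ops : List String) (nums : List Int) (i : Nat) (v : Int) : Int :=
  if ops.getD i "" == "*" then v * nums.getD i 0 else v + nums.getD i 0

theorem pvStepA_eq (ops : List String) (values : List Int) (line : String) :
    pvStepA ops values line =
      (List.range (min (pvNums line).length ops.length)).foldl
        (fun vals i => vals.set i (pvF ops (pvNums line) i (vals.getD i 0))) values := by
  unfold pvStepA
  rw [pv_zipzip ops.length (pvNums line) ops rfl, List.foldl_map]
  congr 1
  funext vals p
  simp only [pvF]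
  exact (apply_ite (vals.set p) _ _ _).symm

theorem pvStepB_length (n : Nat) (cols : List (List Int)) (line : String) :
    (pvStepB n cols line).length = cols.length := by
  unfold pvStepB
  exact pv_set_foldl_length (fun i c => c ++ [(pvNums line).getD i 0]) [] _ cols

theorem pvStepB_get? (n : Nat) (cols : List (List Int)) (line : String)
    (h : min (pvNums line).length n ≤ cols.length) (k : Nat) :
    (pvStepB n cols line)[k]? =
      if k < min (pvNums line).length n then
        some (cols.getD k [] ++ [(pvNums line).getD k 0])
      else cols[k]? := by
  unfold pvStepB
  exact pv_set_foldl_get? (fun i c => c ++ [(pvNums line).getD i 0]) [] _ cols h k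

theorem pv_map_zip_get? (cs : List (List Int)) (ops : List String) (k : Nat)
    (h : cs.length = ops.length) :
    ((cs.zip ops).map pvRed)[k]? =
      if k < ops.length then some (pvRed (cs.getD k [], ops.getD k "")) else none := by
  rw [List.getElem?_map]
  by_cases hk : k < ops.length
  · rw [List.getElem?_eq_getElem (l := cs.zip ops) (by simp [h]; omega)]
    rw [if_pos hk]
    simp only [List.getElem_zip, Option.map_some]
    rw [List.getD_eq_getElem (hn := by omega), List.getD_eq_getElem (hn := by omega)]
  · rw [List.getElem?_eq_none (l := cs.zip ops) (by simp [h]; omega), if_neg hk]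
    rfl

theorem pv_step (ops : List String) (line : String) (cols : List (List Int))
    (hc : cols.length = ops.length) :
    pvStepA ops ((cols.zip ops).map pvRed) line
      = ((pvStepB ops.length cols line).zip ops).map pvRed := by
  have hvlen : ((cols.zip ops).map pvRed).length = ops.length := by simp [hc]
  have hblen := pvStepB_length ops.length cols line
  apply List.ext_getElem?
  intro k
  have hR := pv_map_zip_get? (pvStepB ops.length cols line) ops k (by omega)
  rw [pvStepA_eq,
      pv_set_foldl_get? (pvF ops (pvNums line)) 0 _ _ (by omega) k, hR]
  by_cases hk : k < ops.length
  · rw [if_pos hk]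
    have hBk : (pvStepB ops.length cols line).getD k []
        = if k < min (pvNums line).length ops.length then
            cols.getD k [] ++ [(pvNums line).getD k 0]
          else cols.getD k [] := by
      rw [List.getD_eq_getElem?_getD, pvStepB_get? _ _ _ (by omega) k]
      split_ifs
      · rw [Option.getD_some]
      · rw [← List.getD_eq_getElem?_getD]
    have hv : ((cols.zip ops).map pvRed).getD k 0
        = pvRed (cols.getD k [], ops.getD k "") := by
      rw [List.getD_eq_getElem?_getD, pv_map_zip_get? _ _ _ hc, if_pos hk, Option.getD_some]
    by_cases hm : k < min (pvNums line).length ops.length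
    · rw [if_pos hm, hv, hBk, if_pos hm]
      simp only [pvF, pvRed, List.foldl_append, List.foldl_cons, List.foldl_nil]
    · rw [if_neg hm, hBk, if_neg hm, pv_map_zip_get? cols ops k hc, if_pos hk]
  · rw [if_neg (by omega), if_neg hk]
    rw [pv_map_zip_get? cols ops k hc, if_neg hk]

theorem pv_rows (ops : List String) :
    ∀ (rows : List String) (cols : List (List Int)), cols.length = ops.length →
      rows.foldl (pvStepA ops) ((cols.zip ops).map pvRed)
        = ((rows.foldl (pvStepB ops.length) cols).zip ops).map pvRed := by
  intro rows
  induction rows with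
  | nil => intro cols hc; rfl
  | cons r t ih =>
    intro cols hc
    rw [List.foldl_cons, List.foldl_cons, pv_step ops r cols hc,
        ih _ (by rw [pvStepB_length, hc])]

theorem pv_init (ops : List String) :
    ((ops.map (fun _ => ([] : List Int))).zip ops).map pvRed
      = ops.map (fun op => if op == "*" then (1 : Int) else 0) := by
  induction ops with
  | nil => rfl
  | cons a t ih => simp only [List.map_cons, List.zip_cons_cons, ih, pvRed, List.foldl_nil]

theorem pv_sum :
    ∀ (l : List (List Int × String)) (t : Int),
      l.foldl (fun t p =>
          t + (if p.2 == "*" then p.1.foldl (· * ·) 1 else p.1.foldl (· + ·) 0)) t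
        = t + (l.map pvRed).sum := by
  intro l
  induction l with
  | nil => intro t; simp
  | cons a u ih =>
    intro t
    rw [List.foldl_cons, ih, List.map_cons, List.sum_cons, ← pv_red_eq, add_assoc]

-- ===== VERDICT (by name: the statement is the Claim_ definition above) =====
theorem part1_spec : Claim_equal_part1 := by
  unfold Claim_equal_part1 Spec_part1
  intro data _ _
  simp only [part1, part1_alt]
  rw [pv_foldl_append (fun op => if op == "*" then (1 : Int) else 0), List.nil_append,
      ← pv_init, pv_rows _ _ _ (by simp), pv_sum, zero_add]
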